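-- pv_equiv track=rewrite | github.com/jisaacchoi/Unraveled | mrf_stage_setter/src/ingest/indexed_gzip_ingester_rare_keys.py | build_span_attempt_sizes
-- ===== SOURCE A (Python) =====
-- from typing import Any, Callable, Dict, Iterator, List, Optional, Set, Tuple
--
-- def build_span_attempt_sizes(max_span_size: int) -> List[int]:
--     """
--     Build escalating span sizes up to max_span_size.
--
--     Example: max=16MB -> [2MB, 4MB, 8MB, 16MB]
--     """
--     if max_span_size <= 0:
--         raise ValueError("max_span_size must be > 0")
--
--     base_span = min(2 * 1024 * 1024, max_span_size)  # 2MB fast path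
--     attempts: List[int] = []
--     span = base_span
--
--     while span < max_span_size:
--         attempts.append(span)
--         span *= 2
--
--     if not attempts or attempts[-1] != max_span_size:
--         attempts.append(max_span_size)
--
--     return attempts
-- ===== SOURCE B (Python) =====
-- def build_span_attempt_sizes(max_span_size):
--     if max_span_size <= 0:
--         raise ValueError("max_span_size must be > 0")
--     k = max(0, (max_span_size - 1).bit_length() - 21)
--     return [(2 * 1024 * 1024) << i for i in range(k)] + [max_span_size]
-- ===== Notes on version B (the rewrite author's own statement) =====
-- stated objective: simpler
-- what changed: Replaces the iterative doubling while-loop with a closed-form count of doubling terms via (max_span_size-1).bit_length(), using that A's final append is in fact unconditional; the ValueError guard is kept.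
import Mathlib
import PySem

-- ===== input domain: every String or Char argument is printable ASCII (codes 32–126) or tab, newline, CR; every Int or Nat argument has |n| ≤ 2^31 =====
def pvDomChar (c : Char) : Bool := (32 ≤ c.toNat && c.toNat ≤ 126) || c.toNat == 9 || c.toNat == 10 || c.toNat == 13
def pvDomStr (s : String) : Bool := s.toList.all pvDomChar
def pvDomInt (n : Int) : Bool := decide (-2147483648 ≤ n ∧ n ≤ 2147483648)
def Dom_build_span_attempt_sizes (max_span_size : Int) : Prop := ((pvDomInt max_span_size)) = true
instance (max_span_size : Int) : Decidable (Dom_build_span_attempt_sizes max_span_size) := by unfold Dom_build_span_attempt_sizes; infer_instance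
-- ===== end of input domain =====

-- B replaces A's iterative doubling while-loop by a closed-form bit-length count of the doubling terms (objective: simpler).


-- ===== PORT A =====
-- the while-loop: while span < max: attempts.append(span); span *= 2
-- (0 < span is carried as a hypothesis for termination; A's loop only runs with span ≥ 1)
def spanLoop (maxs span : Int) (hspan : 0 < span) (acc : List Int) : List Int :=
  if _h : span < maxs then spanLoop maxs (span * 2) (by omega) (acc ++ [span]) else acc
termination_by (maxs - span).toNat
decreasing_by omega

def build_span_attempt_sizes (max_span_size : Int) : List Int :=
  if h : max_span_size ≤ 0 then []   -- Python raises ValueError here; excluded by Pre_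
  else
    let base_span := min (2 * 1024 * 1024) max_span_size
    let attempts := spanLoop max_span_size base_span (by omega) []
    if attempts = [] ∨ PySem.List.pyGet? attempts (-1) ≠ some max_span_size then
      attempts ++ [max_span_size]
    else attempts

-- ===== PORT B =====
def build_span_attempt_sizes_alt (max_span_size : Int) : List Int :=
  if max_span_size ≤ 0 then []       -- Python raises ValueError here; excluded by Pre_
  else
    let k : Int := max 0 ((PySem.Int.bitLength (max_span_size - 1) : Int) - 21)
    ((PySem.List.pyRange 0 k 1).map (fun i => (2 * 1024 * 1024 : Int) <<< i.toNat))
      ++ [max_span_size]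

-- ===== PRECONDITION & SPEC =====
-- Pre_ excludes exactly max_span_size ≤ 0, where Python A raises ValueError.
def Pre_build_span_attempt_sizes (max_span_size : Int) : Prop := 0 < max_span_size
instance (max_span_size : Int) : Decidable (Pre_build_span_attempt_sizes max_span_size) := by unfold Pre_build_span_attempt_sizes; infer_instance
def pvWitness_build_span_attempt_sizes : Int := 5000000

def Spec_build_span_attempt_sizes (max_span_size : Int) (out : List Int) : Prop := out = build_span_attempt_sizes_alt max_span_size
instance (max_span_size : Int) (out : List Int) : Decidable (Spec_build_span_attempt_sizes max_span_size out) := by unfold Spec_build_span_attempt_sizes; infer_instance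

-- ===== CLAIM (what is proved, stated in full; the proofs are below) =====
def Claim_equal_build_span_attempt_sizes : Prop := ∀ (max_span_size : Int), Dom_build_span_attempt_sizes max_span_size → Pre_build_span_attempt_sizes max_span_size → Spec_build_span_attempt_sizes max_span_size (build_span_attempt_sizes max_span_size)

-- ===== LEMMAS AND PROOFS =====

-- the loop appends to the accumulator on the left
theorem spanLoop_acc (maxs span : Int) (h : 0 < span) (acc : List Int) :
    spanLoop maxs span h acc = acc ++ spanLoop maxs span h [] := by
  have hgen : ∀ (n : Nat) (span : Int) (h : 0 < span) (acc : List Int),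
      (maxs - span).toNat ≤ n → spanLoop maxs span h acc = acc ++ spanLoop maxs span h [] := by
    intro n
    induction n with
    | zero =>
        intro span h acc hn
        have hge : ¬ (span < maxs) := by omega
        conv_lhs => rw [spanLoop]
        conv_rhs => rw [spanLoop]
        simp [hge]
    | succ n ih =>
        intro span h acc hn
        by_cases hlt : span < maxs
        · conv_lhs => rw [spanLoop]
          conv_rhs => rw [spanLoop]
          simp only [hlt, dif_pos]
          rw [ih (span * 2) (by omega) (acc ++ [span]) (by omega),
              ih (span * 2) (by omega) ([] ++ [span]) (by omega)]
          simp
        · conv_lhs => rw [spanLoop]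
          conv_rhs => rw [spanLoop]
          simp [hlt]
  exact hgen (maxs - span).toNat span h acc le_rfl

-- every element the loop emits is < maxs
theorem spanLoop_mem_lt (maxs span : Int) (h : 0 < span) (x : Int)
    (hx : x ∈ spanLoop maxs span h []) : x < maxs := by
  have hgen : ∀ (span : Int) (h : 0 < span) (acc : List Int),
      (∀ y ∈ acc, y < maxs) → ∀ y ∈ spanLoop maxs span h acc, y < maxs := by
    intro span h acc
    induction span, h, acc using spanLoop.induct maxs with
    | case1 span h acc hlt ih =>
        intro hacc y hy
        rw [spanLoop] at hy
        simp only [hlt, dif_pos] at hy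
        refine ih ?_ y hy
        intro z hz
        rcases List.mem_append.mp hz with h1 | h1
        · exact hacc z h1
        · simp at h1; omega
    | case2 span h acc hlt =>
        intro hacc y hy
        rw [spanLoop] at hy
        simp only [hlt, dif_neg, not_false_iff] at hy
        exact hacc y hy
  exact hgen span h [] (by simp) x hx

-- 2^p < m ↔ p < bitLength (m-1), for 0 < m
theorem two_pow_lt_iff (m : Int) (hm : 0 < m) (p : Nat) :
    (2 : Int) ^ p < m ↔ p < PySem.Int.bitLength (m - 1) := by
  have habs : ((m - 1).natAbs : Int) = m - 1 := Int.natAbs_of_nonneg (by omega)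
  have hcast : ((2 ^ p : Nat) : Int) = (2 : Int) ^ p := by push_cast; ring
  constructor
  · intro hlt
    by_contra hp
    have h2 := PySem.Int.lt_two_pow_bitLength (m - 1)
    have : (m - 1).natAbs < 2 ^ p :=
      lt_of_lt_of_le h2 (Nat.pow_le_pow_right (by omega) (by omega))
    omega
  · intro hp
    have hne : m - 1 ≠ 0 := by
      intro h0
      rw [h0, PySem.Int.bitLength_zero] at hp
      omega
    have h1 := PySem.Int.two_pow_bitLength_le (m - 1) hne
    have : 2 ^ p ≤ (m - 1).natAbs :=
      le_trans (Nat.pow_le_pow_right (by omega) (by omega)) h1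
    omega

-- closed form of the loop started at a power of two
theorem spanLoop_closed (m : Int) (hm : 0 < m) (p : Nat) (h : 0 < (2 : Int) ^ p) :
    spanLoop m ((2 : Int) ^ p) h [] =
      (List.range (PySem.Int.bitLength (m - 1) - p)).map (fun i => (2 : Int) ^ (p + i)) := by
  set K := PySem.Int.bitLength (m - 1) with hK
  clear_value K
  have hgen : ∀ (d p : Nat) (h : 0 < (2 : Int) ^ p), K - p = d →
      spanLoop m ((2 : Int) ^ p) h [] =
        (List.range (K - p)).map (fun i => (2 : Int) ^ (p + i)) := by
    intro d
    induction d with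
    | zero =>
        intro p h hd
        have hge : ¬ ((2 : Int) ^ p < m) := by
          rw [two_pow_lt_iff m hm p, ← hK]; omega
        rw [spanLoop]
        simp [hge, hd]
    | succ d ih =>
        intro p h hd
        have hlt : (2 : Int) ^ p < m := by
          rw [two_pow_lt_iff m hm p, ← hK]; omega
        rw [spanLoop]
        simp only [hlt, dif_pos]
        rw [spanLoop_acc]
        have h2 : (2 : Int) ^ p * 2 = (2 : Int) ^ (p + 1) := by ring
        rw [show (spanLoop m ((2:Int)^p * 2) (by omega) [] : List Int)
              = spanLoop m ((2:Int)^(p+1)) (by positivity) [] from by congr 1]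
        rw [ih (p + 1) (by positivity) (by omega)]
        have hrange : K - p = (K - (p + 1)) + 1 := by omega
        rw [hrange, List.range_succ_eq_map, List.map_cons, List.map_map]
        simp only [List.nil_append, List.cons_append]
        congr 1
        refine List.map_congr_left (fun a _ => ?_)
        simp only [Function.comp_apply]
        congr 1
        omega
  exact hgen (K - p) p h rfl

-- A's final condition always holds, so A = loop result ++ [max]
theorem A_eq_loop_append (m : Int) (hm : 0 < m) :
    build_span_attempt_sizes m =
      spanLoop m (min (2 * 1024 * 1024) m) (by omega) [] ++ [m] := by
  rw [build_span_attempt_sizes]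
  simp only [dif_neg (by omega : ¬ m ≤ 0)]
  set attempts := spanLoop m (min (2 * 1024 * 1024) m) (by omega) [] with hatt
  have hcond : attempts = [] ∨ PySem.List.pyGet? attempts (-1) ≠ some m := by
    by_cases hnil : attempts = []
    · exact Or.inl hnil
    · right
      intro hget
      have hx : m ∈ attempts := PySem.List.mem_of_pyGet?_eq_some attempts hget
      have := spanLoop_mem_lt m (min (2 * 1024 * 1024) m) (by omega) m (hatt ▸ hx)
      omega
  simp [hcond]

-- ===== VERDICT (by name: the statement is the Claim_ definition above) =====
theorem build_span_attempt_sizes_spec : Claim_equal_build_span_attempt_sizes := by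
  intro m _ hm
  unfold Spec_build_span_attempt_sizes
  have hm' : (0 : Int) < m := hm
  rw [A_eq_loop_append m hm', build_span_attempt_sizes_alt]
  simp only [if_neg (by omega : ¬ m ≤ 0)]
  by_cases hsmall : m ≤ 2 * 1024 * 1024
  · -- base = m; loop does not run; bitLength (m-1) ≤ 21 so k = 0
    have hmin : min (2 * 1024 * 1024 : Int) m = m := by omega
    have hbl : PySem.Int.bitLength (m - 1) ≤ 21 := by
      by_contra hb
      have := (two_pow_lt_iff m hm' 21).mpr (by omega)
      norm_num at this
      omega
    have hk : max (0:Int) ((PySem.Int.bitLength (m - 1) : Int) - 21) = 0 := by omega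
    rw [spanLoop]
    simp only [hmin, lt_irrefl, dite_false, hk]
    simp
  · -- base = 2^21; closed form
    have hmin : min (2 * 1024 * 1024 : Int) m = (2 : Int) ^ 21 := by
      norm_num; omega
    have hbl : 21 < PySem.Int.bitLength (m - 1) := by
      rw [← two_pow_lt_iff m hm' 21]; norm_num; omega
    rw [show (spanLoop m (min (2 * 1024 * 1024) m) (by omega) [] : List Int)
          = spanLoop m ((2:Int)^21) (by positivity) [] from by congr 1]
    rw [spanLoop_closed m hm' 21]
    have hk : max (0:Int) ((PySem.Int.bitLength (m - 1) : Int) - 21)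
        = ((PySem.Int.bitLength (m - 1) - 21 : Nat) : Int) := by
      push_cast [Nat.cast_sub (by omega : 21 ≤ PySem.Int.bitLength (m - 1))]
      omega
    rw [hk, PySem.List.pyRange_one]
    congr 1
    rw [List.map_map]
    apply List.map_congr_left
    intro i _
    simp only [Function.comp]
    have h0 : ((0 : Int) + (i : Int)).toNat = i := by omega
    rw [h0, Int.shiftLeft_natCast_right, Int.shiftLeft_eq]
    norm_num
    ring
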